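-- pv_equiv track=rewrite | github.com/arindyproject/dbdiagram2laravel | man.py | split_tabel_ref
-- ===== SOURCE A (Python) =====
-- def split_tabel_ref(text):
--     # Pisahkan teks berdasarkan baris baru
--     lines = text.strip().splitlines()
--     # Daftar untuk tabel dan referensi
--     tables = []
--     refs = []
--     # Variabel sementara untuk menyimpan blok tabel
--     current_table = []
--     # Iterasi melalui setiap baris
--     for line in lines:
--         line = line.strip()  # Hapus spasi di awal dan akhir
--         if line.startswith("Table"):
--             if current_table:  # Jika ada blok tabel sebelumnya, tambahkan ke daftar tabel
--                 tables.append("\n".join(current_table))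
--                 current_table = []  # Reset blok tabel
--             current_table.append(line)  # Mulai blok tabel baru
--         elif line.startswith("Ref:"):
--             refs.append(line)  # Tambahkan ke daftar referensi
--         elif current_table:  # Tambahkan baris ke blok tabel saat ini jika ada
--             current_table.append(line)
--     # Tambahkan tabel terakhir jika ada
--     if current_table:
--         tables.append("\n".join(current_table))
--     return tables, refs
-- ===== SOURCE B (Python) =====
-- def split_tabel_ref(text):
--     lines = [l.strip() for l in text.strip().splitlines()]
--     refs = [l for l in lines if l.startswith("Ref:")]
--     non_ref = [l for l in lines if not l.startswith("Ref:")]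
--     starts = [i for i, l in enumerate(non_ref) if l.startswith("Table")]
--     bounds = starts + [len(non_ref)]
--     tables = ["\n".join(non_ref[s:e]) for s, e in zip(bounds, bounds[1:])]
--     return tables, refs
-- ===== Notes on version B (the rewrite author's own statement) =====
-- stated objective: alternative
-- what changed: A's single stateful pass (accumulator of the current table block, conditional flushes) is replaced by filtering out Ref lines, computing the Table boundary indices, and joining the slices of the non-ref lines between consecutive boundaries.
import Mathlib
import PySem

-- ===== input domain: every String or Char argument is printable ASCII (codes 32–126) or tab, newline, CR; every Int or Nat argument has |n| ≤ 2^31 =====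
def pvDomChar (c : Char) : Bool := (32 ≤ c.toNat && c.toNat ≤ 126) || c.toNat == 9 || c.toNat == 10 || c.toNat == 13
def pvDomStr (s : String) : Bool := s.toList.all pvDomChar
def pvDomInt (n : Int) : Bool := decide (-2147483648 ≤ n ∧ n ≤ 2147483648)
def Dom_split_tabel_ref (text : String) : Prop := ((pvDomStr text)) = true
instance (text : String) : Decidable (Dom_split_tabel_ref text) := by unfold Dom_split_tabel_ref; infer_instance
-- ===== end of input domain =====

-- B replaces A's single-pass accumulator loop by: filter out Ref lines, compute Table boundary
-- indices, and slice the remaining lines between consecutive boundaries (objective: alternative decomposition).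

-- ===== PORT A =====
def split_tabel_ref (text : String) : List String × List String :=
  let lines := PySem.Str.splitlines (PySem.Str.strip text)
  let st := lines.foldl (fun (s : List String × List String × List String) rawline =>
    let tables := s.1
    let refs := s.2.1
    let cur := s.2.2
    let line := PySem.Str.strip rawline
    if PySem.Str.startswith line "Table" then
      let tc := if cur ≠ [] then (tables ++ [PySem.Str.join "\n" cur], ([] : List String)) else (tables, cur)
      (tc.1, refs, tc.2 ++ [line])
    else if PySem.Str.startswith line "Ref:" then
      (tables, refs ++ [line], cur)
    else if cur ≠ [] then
      (tables, refs, cur ++ [line])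
    else s) ([], [], [])
  (if st.2.2 ≠ [] then st.1 ++ [PySem.Str.join "\n" st.2.2] else st.1, st.2.1)

-- ===== PORT B =====
def split_tabel_ref_alt (text : String) : List String × List String :=
  let lines := (PySem.Str.splitlines (PySem.Str.strip text)).map PySem.Str.strip
  let refs := lines.filter (fun l => PySem.Str.startswith l "Ref:")
  let nonRef := lines.filter (fun l => !PySem.Str.startswith l "Ref:")
  let starts := (PySem.List.enumerate nonRef 0).filterMap
    (fun p => if PySem.Str.startswith p.2 "Table" then some p.1 else none)
  let bounds := starts ++ [(nonRef.length : Int)]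
  let tables := (bounds.zip bounds.tail).map
    (fun p => PySem.Str.join "\n" (PySem.List.slice nonRef (some p.1) (some p.2)))
  (tables, refs)

-- ===== PRECONDITION & SPEC =====
def Spec_split_tabel_ref (text : String) (out : List String × List String) : Prop := out = split_tabel_ref_alt text
instance (text : String) (out : List String × List String) : Decidable (Spec_split_tabel_ref text out) := by unfold Spec_split_tabel_ref; infer_instance

-- ===== CLAIM (what is proved, stated in full; the proofs are below) =====
def Claim_equal_split_tabel_ref : Prop := ∀ (text : String), Dom_split_tabel_ref text → Spec_split_tabel_ref text (split_tabel_ref text)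

-- ===== LEMMAS AND PROOFS =====

def pvIsTable (l : String) : Bool := PySem.Str.startswith l "Table"
def pvIsRef (l : String) : Bool := PySem.Str.startswith l "Ref:"

/-- A's loop step, on an already-stripped line. -/
def pvStepNS (s : List String × List String × List String) (line : String) :
    List String × List String × List String :=
  let tables := s.1
  let refs := s.2.1
  let cur := s.2.2
  if PySem.Str.startswith line "Table" then
    let tc := if cur ≠ [] then (tables ++ [PySem.Str.join "\n" cur], ([] : List String)) else (tables, cur)
    (tc.1, refs, tc.2 ++ [line])
  else if PySem.Str.startswith line "Ref:" then
    (tables, refs ++ [line], cur)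
  else if cur ≠ [] then
    (tables, refs, cur ++ [line])
  else s

def pvFinalize (s : List String × List String × List String) : List String × List String :=
  (if s.2.2 ≠ [] then s.1 ++ [PySem.Str.join "\n" s.2.2] else s.1, s.2.1)

/-- Recursive grouping of the non-ref lines into table blocks (A's semantics, refs removed). -/
def pvTablesFrom (cur : List String) : List String → List String
  | [] => if cur ≠ [] then [PySem.Str.join "\n" cur] else []
  | x :: ns =>
    if pvIsTable x then
      (if cur ≠ [] then [PySem.Str.join "\n" cur] else []) ++ pvTablesFrom [x] ns
    else if cur ≠ [] then pvTablesFrom (cur ++ [x]) ns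
    else pvTablesFrom cur ns

def pvStarts (ns : List String) : List Int :=
  (PySem.List.enumerate ns 0).filterMap
    (fun p => if PySem.Str.startswith p.2 "Table" then some p.1 else none)

def pvSliceTables (ns : List String) : List String :=
  ((pvStarts ns ++ [(ns.length : Int)]).zip (pvStarts ns ++ [(ns.length : Int)]).tail).map
    (fun p => PySem.Str.join "\n" (PySem.List.slice ns (some p.1) (some p.2)))

lemma pv_table_not_ref {x : String} (h : pvIsTable x = true) : pvIsRef x = false := by
  unfold pvIsTable at h
  unfold pvIsRef
  rw [PySem.Str.startswith_eq] at h ⊢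
  rw [PySem.Chars.startswith_iff] at h
  by_contra hr
  rw [Bool.not_eq_false, PySem.Chars.startswith_iff] at hr
  obtain ⟨u, hu⟩ := h
  obtain ⟨v, hv⟩ := hr
  rw [← hu] at hv
  simp at hv

lemma pv_enum_shift (ns : List String) (s : Int) :
    PySem.List.enumerate ns (s + 1) = (PySem.List.enumerate ns s).map (fun p => (p.1 + 1, p.2)) := by
  induction ns generalizing s with
  | nil => simp [PySem.List.enumerate_nil]
  | cons x ns ih =>
    rw [PySem.List.enumerate_cons, PySem.List.enumerate_cons]
    have : s + 1 + 1 = (s + 1) + 1 := by ring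
    rw [this, ih (s + 1)]
    simp

lemma pv_starts_nil : pvStarts [] = [] := by
  simp [pvStarts, PySem.List.enumerate_nil]

lemma pv_starts_cons (x : String) (ns : List String) :
    pvStarts (x :: ns) =
      (if pvIsTable x then [(0 : Int)] else []) ++ (pvStarts ns).map (· + 1) := by
  unfold pvStarts pvIsTable
  rw [PySem.List.enumerate_cons, pv_enum_shift ns 0, List.filterMap_cons, List.filterMap_map]
  have h2 : ((fun (p : Int × String) => if PySem.Str.startswith p.2 "Table" then some p.1 else none) ∘
      (fun (p : Int × String) => (p.1 + 1, p.2)))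
      = fun p => Option.map (· + 1) (if PySem.Str.startswith p.2 "Table" then some p.1 else none) := by
    funext p
    by_cases h : PySem.Str.startswith p.2 "Table" <;> simp [h, -PySem.Str.startswith_eq]
  rw [h2, ← List.map_filterMap]
  by_cases h : PySem.Str.startswith x "Table" <;> simp [h, -PySem.Str.startswith_eq]

lemma pv_starts_nonneg (ns : List String) : ∀ i ∈ pvStarts ns, (0 : Int) ≤ i := by
  induction ns with
  | nil => simp [pv_starts_nil]
  | cons x ns ih =>
    intro i hi
    rw [pv_starts_cons] at hi
    rcases List.mem_append.mp hi with h | h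
    · split at h <;> simp_all
    · obtain ⟨j, hj, rfl⟩ := List.mem_map.mp h
      have := ih j hj
      omega

lemma pv_bounds_nonneg (ns : List String) :
    ∀ i ∈ pvStarts ns ++ [(ns.length : Int)], (0 : Int) ≤ i := by
  intro i hi
  rcases List.mem_append.mp hi with h | h
  · exact pv_starts_nonneg ns i h
  · simp at h
    omega

lemma pv_slice_shift (x : String) (ns : List String) (a b : Int) (ha : 0 ≤ a) (hb : 0 ≤ b) :
    PySem.List.slice (x :: ns) (some (a + 1)) (some (b + 1)) =
      PySem.List.slice ns (some a) (some b) := by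
  rw [PySem.List.slice_toNat _ (by omega : (0:Int) ≤ a + 1) (by omega : (0:Int) ≤ b + 1),
    PySem.List.slice_toNat _ ha hb]
  have h1 : (a + 1).toNat = a.toNat + 1 := by omega
  have h2 : (b + 1).toNat = b.toNat + 1 := by omega
  rw [h1, h2, List.drop_succ_cons]
  congr 1
  omega

lemma pv_head_bound (ns : List String) :
    (pvStarts ns ++ [(ns.length : Int)]).head? =
      some (((ns.takeWhile (fun l => !pvIsTable l)).length : Int)) := by
  induction ns with
  | nil => simp [pv_starts_nil]
  | cons x ns ih =>
    rw [pv_starts_cons]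
    by_cases h : pvIsTable x
    · rw [if_pos h]
      simp [h]
    · rw [if_neg h, List.takeWhile_cons_of_pos (by simp [Bool.not_eq_true] at h ⊢; exact h)]
      have hlen : (((x :: ns).length : Int)) = (ns.length : Int) + 1 := by simp
      have hmap : [((ns.length : Int)) + 1] = List.map (· + 1) [(ns.length : Int)] := rfl
      rw [List.nil_append, hlen, hmap, ← List.map_append, List.head?_map, ih]
      simp

lemma pv_sliceTables_nil : pvSliceTables [] = [] := by
  simp [pvSliceTables, pv_starts_nil]

lemma pv_zip_tail_shift (u : List Int) :
    ((u.map (· + 1)).zip (u.map (· + 1)).tail) =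
      (u.zip u.tail).map (Prod.map (· + 1) (· + 1)) := by
  rw [← List.map_tail, List.zip_map]

lemma pv_zip_cons (a : Int) (w : List Int) (hw : w ≠ []) :
    ((a :: w).zip (a :: w).tail) = (a, w.headD 0) :: (w.zip w.tail) := by
  obtain ⟨h0, t, rfl⟩ := List.exists_cons_of_ne_nil hw
  simp

lemma pv_shifted_tables (x : String) (ns : List String) (u : List Int)
    (hu : ∀ i ∈ u, (0 : Int) ≤ i) :
    ((u.zip u.tail).map (Prod.map (· + 1) (· + 1))).map
        (fun p => PySem.Str.join "\n" (PySem.List.slice (x :: ns) (some p.1) (some p.2))) =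
      (u.zip u.tail).map
        (fun p => PySem.Str.join "\n" (PySem.List.slice ns (some p.1) (some p.2))) := by
  rw [List.map_map]
  apply List.map_congr_left
  intro p hp
  obtain ⟨p1, p2⟩ := p
  obtain ⟨h1, h2⟩ := List.of_mem_zip hp
  have h2' : p2 ∈ u := List.mem_of_mem_tail h2
  simp only [Function.comp, Prod.map]
  rw [pv_slice_shift x ns p1 p2 (hu p1 h1) (hu p2 h2')]

lemma pv_sliceTables_cons_nt {x : String} (ns : List String) (h : pvIsTable x = false) :
    pvSliceTables (x :: ns) = pvSliceTables ns := by
  unfold pvSliceTables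
  rw [pv_starts_cons, if_neg (by simp [h])]
  have hlen : (((x :: ns).length : Int)) = (ns.length : Int) + 1 := by simp
  have hmap : [((ns.length : Int)) + 1] = List.map (· + 1) [(ns.length : Int)] := rfl
  rw [List.nil_append, hlen, hmap, ← List.map_append, pv_zip_tail_shift,
    pv_shifted_tables x ns _ (pv_bounds_nonneg ns)]

lemma pv_sliceTables_cons_t {x : String} (ns : List String) (h : pvIsTable x = true) :
    pvSliceTables (x :: ns) =
      PySem.Str.join "\n" (x :: ns.takeWhile (fun l => !pvIsTable l)) :: pvSliceTables ns := by
  obtain ⟨b0, bt, hb⟩ :=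
    List.exists_cons_of_ne_nil (show pvStarts ns ++ [(ns.length : Int)] ≠ [] by simp)
  have hhead : b0 = ((ns.takeWhile (fun l => !pvIsTable l)).length : Int) := by
    have hx := pv_head_bound ns
    rw [hb] at hx
    simpa using hx
  unfold pvSliceTables
  rw [pv_starts_cons, if_pos h]
  have hlen : (((x :: ns).length : Int)) = (ns.length : Int) + 1 := by simp
  have hmap : [((ns.length : Int)) + 1] = List.map (· + 1) [(ns.length : Int)] := rfl
  rw [List.singleton_append, hlen, hmap, List.cons_append, ← List.map_append,
    pv_zip_cons 0 _ (by simp : (pvStarts ns ++ [(ns.length : Int)]).map (· + 1) ≠ []),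
    List.map_cons, pv_zip_tail_shift, pv_shifted_tables x ns _ (pv_bounds_nonneg ns)]
  congr 1
  -- first block: slice (x :: ns) [0 : b0+1] = x :: takeWhile
  have hh : ((pvStarts ns ++ [(ns.length : Int)]).map (· + 1)).headD 0
      = ((ns.takeWhile (fun l => !pvIsTable l)).length : Int) + 1 := by
    rw [hb]
    simp [hhead]
  rw [hh]
  rw [PySem.List.slice_zero_start, PySem.List.slice_to _ (by positivity)]
  have ht : (((ns.takeWhile (fun l => !pvIsTable l)).length : Int) + 1).toNat
      = (ns.takeWhile (fun l => !pvIsTable l)).length + 1 := by omega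
  rw [ht, List.take_succ_cons]
  congr 2
  exact ((List.prefix_iff_eq_take).mp (List.takeWhile_prefix _)).symm

lemma pv_tablesFrom_ne :
    ∀ (ns c : List String), c ≠ [] →
      pvTablesFrom c ns =
        PySem.Str.join "\n" (c ++ ns.takeWhile (fun l => !pvIsTable l)) :: pvSliceTables ns := by
  intro ns
  induction ns with
  | nil => intro c hc; simp [pvTablesFrom, hc, pv_sliceTables_nil]
  | cons x ns ih =>
    intro c hc
    by_cases h : pvIsTable x
    · rw [pvTablesFrom, if_pos h, if_pos hc, ih [x] (by simp),
        List.takeWhile_cons_of_neg (by simp [h]), pv_sliceTables_cons_t ns h]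
      simp
    · have hf : pvIsTable x = false := by simpa using h
      rw [pvTablesFrom, if_neg (by simp [hf]), if_pos hc, ih (c ++ [x]) (by simp),
        List.takeWhile_cons_of_pos (by simp [hf]), pv_sliceTables_cons_nt ns hf]
      simp

lemma pv_tablesFrom_nil_eq : ∀ ns : List String, pvTablesFrom [] ns = pvSliceTables ns := by
  intro ns
  induction ns with
  | nil => simp [pvTablesFrom, pv_sliceTables_nil]
  | cons x ns ih =>
    by_cases h : pvIsTable x
    · rw [pvTablesFrom, if_pos h, pv_tablesFrom_ne ns [x] (by simp),
        pv_sliceTables_cons_t ns h]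
      simp
    · have hf : pvIsTable x = false := by simpa using h
      rw [pvTablesFrom, if_neg (by simp [hf]), pv_sliceTables_cons_nt ns hf]
      simpa using ih

lemma pv_invA (M : List String) :
    ∀ (t r c : List String),
      pvFinalize (M.foldl pvStepNS (t, r, c)) =
        (t ++ pvTablesFrom c (M.filter (fun l => !pvIsRef l)),
         r ++ M.filter (fun l => pvIsRef l)) := by
  induction M with
  | nil =>
    intro t r c
    by_cases hc : c = [] <;> simp [pvFinalize, pvTablesFrom, hc]
  | cons x M ih =>
    intro t r c
    rw [List.foldl_cons]
    by_cases hT : PySem.Str.startswith x "Table"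
    · have hRf : pvIsRef x = false := pv_table_not_ref (show pvIsTable x = true from hT)
      by_cases hc : c = []
      · have hstep : pvStepNS (t, r, c) x = (t, r, [x]) := by
          simp [pvStepNS, hT, hc, -PySem.Str.startswith_eq]
        rw [hstep, ih, List.filter_cons, List.filter_cons]
        simp only [hRf, Bool.not_false, if_pos, Bool.false_eq_true, if_false]
        rw [pvTablesFrom, if_pos (show pvIsTable x = true from hT), if_neg (by simp [hc])]
        simp
      · have hstep : pvStepNS (t, r, c) x = (t ++ [PySem.Str.join "\n" c], r, [x]) := by
          simp [pvStepNS, hT, hc, -PySem.Str.startswith_eq]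
        rw [hstep, ih, List.filter_cons, List.filter_cons]
        simp only [hRf, Bool.not_false, if_pos, Bool.false_eq_true, if_false]
        rw [pvTablesFrom, if_pos (show pvIsTable x = true from hT), if_pos hc]
        simp
    · by_cases hR : PySem.Str.startswith x "Ref:"
      · have hstep : pvStepNS (t, r, c) x = (t, r ++ [x], c) := by
          simp [pvStepNS, hT, hR, -PySem.Str.startswith_eq]
        rw [hstep, ih, List.filter_cons, List.filter_cons]
        have hRf : pvIsRef x = true := hR
        simp [hRf]
      · have hRf : pvIsRef x = false := by simpa [pvIsRef] using hR
        have hTf : pvIsTable x = false := by simpa [pvIsTable] using hT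
        by_cases hc : c = []
        · have hstep : pvStepNS (t, r, c) x = (t, r, c) := by
            simp [pvStepNS, hT, hR, hc, -PySem.Str.startswith_eq]
          rw [hstep, ih, List.filter_cons, List.filter_cons]
          simp only [hRf, Bool.not_false, if_pos, Bool.false_eq_true, if_false]
          rw [pvTablesFrom, if_neg (by simp [hTf]), if_neg (by simp [hc])]
        · have hstep : pvStepNS (t, r, c) x = (t, r, c ++ [x]) := by
            simp [pvStepNS, hT, hR, hc, -PySem.Str.startswith_eq]
          rw [hstep, ih, List.filter_cons, List.filter_cons]
          simp only [hRf, Bool.not_false, if_pos, Bool.false_eq_true, if_false]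
          rw [pvTablesFrom, if_neg (by simp [hTf]), if_pos hc]

lemma pv_portA_eq (text : String) :
    split_tabel_ref text =
      pvFinalize (((PySem.Str.splitlines (PySem.Str.strip text)).map PySem.Str.strip).foldl
        pvStepNS ([], [], [])) := by
  unfold split_tabel_ref
  rw [List.foldl_map]
  simp only [pvFinalize, pvStepNS]

lemma pv_portB_eq (text : String) :
    split_tabel_ref_alt text =
      (pvSliceTables
         (((PySem.Str.splitlines (PySem.Str.strip text)).map PySem.Str.strip).filter
           (fun l => !pvIsRef l)),
       ((PySem.Str.splitlines (PySem.Str.strip text)).map PySem.Str.strip).filter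
         (fun l => pvIsRef l)) := rfl

theorem split_tabel_ref_spec : Claim_equal_split_tabel_ref := by
  intro text _
  unfold Spec_split_tabel_ref
  rw [pv_portA_eq, pv_portB_eq, pv_invA]
  simp [pv_tablesFrom_nil_eq]
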